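-- pv_equiv track=rewrite | github.com/StopSoo/PS | 2025-PS/week-37/[SILVER II] 투에-모스문자열.py | solve
-- ===== SOURCE A (Python) =====
-- def solve(k):
--   if k == 1:
--     return 0 # 첫 번째 문자는 항상 0
--   # k를 포함하는 구간 찾기 (2의 거듭제곱)
--   length = 1
--   while length < k:
--     length *= 2
--
--   mid = length // 2 # 절반 지점
--   if k <= mid: return solve(k)
--   else: return 1 - solve(k - mid) # 뒤 절반은 뒤집어야 함
-- ===== SOURCE B (Python) =====
-- def solve(k):
--     # Thue-Morse bit: parity of the number of set bits of k-1.
--     return bin(k - 1).count('1') & 1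
-- ===== Notes on version B (the rewrite author's own statement) =====
-- stated objective: simpler
-- what changed: Replaces the length-doubling recursive halving with the closed-form popcount parity of k-1 (bin(k-1).count('1') & 1).
-- outside the precondition, e.g. on solve(0): A raises RecursionError, B returns 1
import Mathlib
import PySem

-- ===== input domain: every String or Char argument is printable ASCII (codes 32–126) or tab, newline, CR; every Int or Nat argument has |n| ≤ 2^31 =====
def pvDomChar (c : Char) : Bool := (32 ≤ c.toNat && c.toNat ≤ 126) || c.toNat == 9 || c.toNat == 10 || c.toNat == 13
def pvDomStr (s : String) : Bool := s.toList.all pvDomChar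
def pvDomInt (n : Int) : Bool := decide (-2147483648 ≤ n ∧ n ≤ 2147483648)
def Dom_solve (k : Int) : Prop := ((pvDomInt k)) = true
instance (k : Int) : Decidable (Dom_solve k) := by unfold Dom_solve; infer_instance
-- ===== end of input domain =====

-- B replaces the length-doubling recursion by the closed-form popcount parity of k-1 (simpler).
-- Python A infinitely recurses (RecursionError) for k ≤ 0; those inputs are excluded by Pre_solve.

-- ===== PORT A =====
-- the 'while length < k: length *= 2' loop; length is always the power 2^j, tracked by its
-- exponent j so the loop is total in Lean (same iterations as Python's loop)
def solveLen (k : Int) (j : Nat) : Int :=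
  if (2 ^ j : Int) < k then solveLen k (j + 1) else (2 ^ j : Int)
termination_by k.toNat - 2 ^ j
decreasing_by
  have h1 : (2 : Int) ^ j < k := by assumption
  have hcast : ((2 ^ j : Nat) : Int) = (2 : Int) ^ j := by push_cast; ring
  have h3 : 2 ^ j < 2 ^ (j + 1) := Nat.pow_lt_pow_right (by norm_num) (by omega)
  omega

-- the self-recursion of Python's solve, made total with fuel; fuel 0 (never reached for k ≥ 1
-- with fuel = k.toNat + 1) corresponds to Python's unbounded recursion on k ≤ 0
def solveFuel (fuel : Nat) (k : Int) : Int :=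
  match fuel with
  | 0 => 0
  | fuel + 1 =>
    if k = 1 then 0
    else
      -- mid = (solveLen k 0) // 2, Python's length//2, written inline
      if k ≤ PySem.Int.floordiv (solveLen k 0) 2 then solveFuel fuel k
      else 1 - solveFuel fuel (k - PySem.Int.floordiv (solveLen k 0) 2)


def solve (k : Int) : Int := solveFuel (k.toNat + 1) k

-- ===== PORT B =====
-- bin(n).count('1') for the nonnegative n arising under Pre_ (bin uses |n|): binary digit sum
def countOnes (n : Nat) : Nat :=
  if n = 0 then 0 else n % 2 + countOnes (n / 2)
decreasing_by exact Nat.div_lt_self (by omega) (by norm_num)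

def solve_alt (k : Int) : Int := ((countOnes (k - 1).natAbs % 2 : Nat) : Int)

-- ===== PRECONDITION & SPEC =====
-- Python A recurses forever (RecursionError) on every k ≤ 0, so those inputs are excluded.
def Pre_solve (k : Int) : Prop := 1 ≤ k
instance (k : Int) : Decidable (Pre_solve k) := by unfold Pre_solve; infer_instance
def pvWitness_solve : Int := (5)

def Spec_solve (k : Int) (out : Int) : Prop := out = solve_alt k
instance (k : Int) (out : Int) : Decidable (Spec_solve k out) := by unfold Spec_solve; infer_instance

-- ===== CLAIM (what is proved, stated in full; the proofs are below) =====
def Claim_equal_solve : Prop := ∀ (k : Int), Dom_solve k → Pre_solve k → Spec_solve k (solve k)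

-- ===== LEMMAS AND PROOFS =====

-- characterisation of the length loop: for 2 ≤ k it returns the least power of two ≥ k
theorem solveLen_spec (k : Int) (j : Nat) (hk : 2 ≤ k) :
    ∃ e : Nat, solveLen k j = (2 ^ e : Int) ∧ k ≤ 2 ^ e ∧
      ((2 ^ j : Int) < k → (2 ^ (e - 1) : Int) < k ∧ 1 ≤ e) := by
  by_cases h : (2 ^ j : Int) < k
  · obtain ⟨e, he, hke, hrest⟩ := solveLen_spec k (j + 1) hk
    rw [solveLen, if_pos h]
    by_cases h2 : (2 ^ (j + 1) : Int) < k
    · exact ⟨e, he, hke, fun _ => hrest h2⟩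
    · have heq : solveLen k (j + 1) = (2 ^ (j + 1) : Int) := by
        rw [solveLen, if_neg h2]
      refine ⟨j + 1, heq, by omega, fun _ => ⟨by simpa using h, by omega⟩⟩
  · rw [solveLen, if_neg h]
    exact ⟨j, rfl, by omega, fun hc => absurd hc h⟩
termination_by k.toNat - 2 ^ j
decreasing_by
  have h1 : (2 : Int) ^ j < k := by assumption
  have hcast : ((2 ^ j : Nat) : Int) = (2 : Int) ^ j := by push_cast; ring
  have h3 : 2 ^ j < 2 ^ (j + 1) := Nat.pow_lt_pow_right (by norm_num) (by omega)
  omega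

theorem countOnes_pow_add (e r : Nat) (hr : r < 2 ^ e) :
    countOnes (2 ^ e + r) = countOnes r + 1 := by
  induction e generalizing r with
  | zero =>
    interval_cases r
    simp [countOnes]
  | succ e ih =>
    rw [countOnes, if_neg (by positivity)]
    have hmod : (2 ^ (e + 1) + r) % 2 = r % 2 := by
      omega
    have hdiv : (2 ^ (e + 1) + r) / 2 = 2 ^ e + r / 2 := by
      omega
    rw [hmod, hdiv, ih (r / 2) (by omega)]
    by_cases h0 : r = 0
    · simp [h0, countOnes]
    · have hre : countOnes r = r % 2 + countOnes (r / 2) := by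
        rw [countOnes, if_neg h0]
      omega

-- the core equivalence, by induction on the fuel
theorem solveFuel_eq (fuel : Nat) (k : Int) (hk : 1 ≤ k) (hf : k.toNat ≤ fuel) :
    solveFuel fuel k = ((countOnes (k - 1).natAbs % 2 : Nat) : Int) := by
  induction fuel generalizing k with
  | zero => omega
  | succ fuel ih =>
    by_cases h1 : k = 1
    · subst h1
      simp [solveFuel, countOnes]
    · have hk2 : 2 ≤ k := by omega
      obtain ⟨e, hlen, hke, hlt⟩ := solveLen_spec k 0 hk2
      have hlt' := hlt (by omega)
      obtain ⟨hhalf, he1⟩ := hlt'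
      rw [solveFuel, if_neg h1, hlen]
      have hmid : PySem.Int.floordiv (2 ^ e : Int) 2 = (2 ^ (e - 1) : Int) := by
        have : (2 ^ e : Int) = 2 ^ (e - 1) * 2 := by
          rw [← pow_succ]
          congr 1
          omega
        rw [this, PySem.Int.floordiv]
        simp [Int.mul_fdiv_cancel]
      rw [hmid, if_neg (by omega)]
      set m : Int := (2 ^ (e - 1) : Int) with hm
      have hm0 : 1 ≤ m := by
        have hp : (0 : Int) < 2 ^ (e - 1) := by positivity
        omega
      have hrec := ih (k - m) (by omega) (by omega)
      rw [hrec]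
      -- k - 1 = 2^(e-1) + r with r = k - m - 1, 0 ≤ r < 2^(e-1)
      have hrk : k ≤ 2 * m := by
        have h2e : (2 ^ e : Int) = 2 * m := by
          rw [hm, ← pow_succ']
          congr 1
          omega
        omega
      -- natAbs decomposition
      have hna : (k - 1).natAbs = 2 ^ (e - 1) + (k - m - 1).natAbs := by
        have hmn : m.natAbs = 2 ^ (e - 1) := by
          rw [hm, Int.natAbs_pow]
          norm_num
        omega
      have hrlt : (k - m - 1).natAbs < 2 ^ (e - 1) := by
        have hmn : m.natAbs = 2 ^ (e - 1) := by
          rw [hm, Int.natAbs_pow]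
          norm_num
        omega
      rw [hna, countOnes_pow_add (e - 1) _ hrlt]
      push_cast
      omega

-- ===== VERDICT (by name: the statement is the Claim_ definition above) =====
theorem solve_spec : Claim_equal_solve := by
  intro k _ hpre
  unfold Spec_solve solve solve_alt
  exact solveFuel_eq (k.toNat + 1) k hpre (by omega)
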